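-- pv_equiv track=rewrite | github.com/pypi-data/pypi-mirror-167 | packages/typetree/typetree-0.1.2.tar.gz/typetree-0.1.2/typetree/typetree.py | group_to_map
-- ===== SOURCE A (Python) =====
-- def group_to_map(v: list[set[int]]) -> dict[tuple[int, int], int]:
--     """Argument v is a list of indices grouped in sets that map to
--     the same structure in a Sequence tree. Their positions indicate
--     where they map to. Example:
--         branches = [A, B, A, A, C, A, B]
--         unique_branches = [A, B, C]
--         v = [{0, 2, 3, 5}, {1, 6}, {4}]
--     means that A shows in indices v[0] = {0, 2, 3, 5}, B shows in
--     indices v[1] = {1, 6}, and C shows in v[2] = {4}.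
--         The return value is a dict of sequential ranges of indices
--     as keys and their mapping to unique_branches. In the previous
--     case it will return {(0, 1): 0, (1, 2): 1, (2, 4): 0, (4, 5): 2,
--     (5, 6): 0, (6, 7): 1}.
--     """
--     if not v:
--         return {}
--     u = {}
--     for k, s in enumerate(v):
--         if not s:
--             continue
--         sv = list(sorted(s))
--         su = [(sv[0], sv[0] + 1)]
--         for x in sv[1:]:
--             if x == su[-1][1]:
--                 su[-1] = (su[-1][0], x + 1)
--             else:
--                 su.append((x, x + 1))
--         for x in su:
--             u[x] = k
--     # noinspection PyTypeChecker
--     return dict(sorted(u.items()))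
-- ===== SOURCE B (Python) =====
-- def group_to_map(v: list[set[int]]) -> dict[tuple[int, int], int]:
--     def ranges(s):
--         sv = sorted(s)
--         gaps = [(x, y) for x, y in zip(sv, sv[1:]) if y != x + 1]
--         starts = sv[:1] + [y for _, y in gaps]
--         ends = [x for x, _ in gaps] + sv[-1:]
--         return zip(starts, ends)
--     u = {(a, b + 1): k for k, s in enumerate(v) for a, b in ranges(s)}
--     return dict(sorted(u.items()))
-- ===== Notes on version B (the rewrite author's own statement) =====
-- stated objective: alternative
-- what changed: Each set's consecutive runs are found by zipping the sorted list with its own tail to collect gap boundaries and pairing run starts with run ends, instead of A's scan that keeps a list of ranges and mutates its last element; the result dict is built from one flattened comprehension instead of nested insertion loops.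
import Mathlib
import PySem

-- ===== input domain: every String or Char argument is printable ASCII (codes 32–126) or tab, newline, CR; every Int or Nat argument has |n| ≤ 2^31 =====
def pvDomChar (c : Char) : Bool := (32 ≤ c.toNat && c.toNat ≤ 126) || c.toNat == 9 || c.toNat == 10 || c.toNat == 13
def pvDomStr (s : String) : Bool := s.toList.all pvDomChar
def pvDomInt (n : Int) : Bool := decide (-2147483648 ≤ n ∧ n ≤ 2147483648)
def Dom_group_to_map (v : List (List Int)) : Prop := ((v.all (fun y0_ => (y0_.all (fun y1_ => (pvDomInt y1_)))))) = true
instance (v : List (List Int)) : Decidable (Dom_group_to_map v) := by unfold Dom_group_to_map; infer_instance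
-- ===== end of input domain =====

-- B detects run boundaries by zipping each sorted set with its own tail and pairing gap starts
-- with gap ends, instead of A's scan that grows the last range of an accumulating list (objective: alternative).

-- ===== PORT A =====
-- inner loop body: 'if x == su[-1][1]: su[-1] = (su[-1][0], x+1) else: su.append((x, x+1))'
-- (su[-1] = getLast?; su is never empty when this runs, the 'none' arm is unreachable dead state)
def runStepA (su : List (Int × Int)) (x : Int) : List (Int × Int) :=
  match su.getLast? with
  | some ab => if x = ab.2 then su.dropLast ++ [(ab.1, x + 1)] else su ++ [(x, x + 1)]
  | none => su ++ [(x, x + 1)]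

def group_to_map (v : List (List Int)) : List (Int × Int × Int) :=
  if v = [] then []
  else
    let u := (PySem.List.enumerate v).foldl
      (fun (u : PySem.Dict (Int × Int) Int) ks =>
        if ks.2 = [] then u   -- 'if not s: continue'
        else
          let sv := PySem.List.sorted ks.2 (fun x => x)
          let su := match sv with
            | [] => []        -- unreachable: sorted of a nonempty list is nonempty
            | x0 :: rest => rest.foldl runStepA [(x0, x0 + 1)]   -- su = [(sv[0], sv[0]+1)]; for x in sv[1:]
          su.foldl (fun u ab => u.insert ab ks.1) u)             -- for x in su: u[x] = k
      PySem.Dict.empty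
    -- 'dict(sorted(u.items()))': dict keys are unique, so dict() of the sorted items keeps that list;
    -- sorted compares the ((a, b), k) tuples, and since keys are distinct only (a, b) decides the order.
    (PySem.List.sorted2 u.items (fun p => p.1.1) (fun p => p.1.2)).map (fun p => (p.1.1, p.1.2, p.2))

-- ===== PORT B =====
-- 'ranges(s)' of Source B: gaps from zip(sv, sv[1:]), then zip(starts, ends)
def gapsOf (sv : List Int) : List (Int × Int) :=
  (sv.zip sv.tail).filter (fun p => p.2 ≠ p.1 + 1)   -- [(x, y) for x, y in zip(sv, sv[1:]) if y != x + 1]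

def rangesB (s : List Int) : List (Int × Int) :=
  let sv := PySem.List.sorted s (fun x => x)
  let gaps := gapsOf sv
  let starts := PySem.List.slice sv none (some 1) ++ gaps.map Prod.snd    -- sv[:1] + [y for _, y in gaps]
  let ends := gaps.map Prod.fst ++ PySem.List.slice sv (some (-1)) none   -- [x for x, _ in gaps] + sv[-1:]
  starts.zip ends

def group_to_map_alt (v : List (List Int)) : List (Int × Int × Int) :=
  let u := PySem.Dict.ofList
    ((PySem.List.enumerate v).flatMap (fun ks => (rangesB ks.2).map (fun ab => ((ab.1, ab.2 + 1), ks.1))))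
  (PySem.List.sorted2 u.items (fun p => p.1.1) (fun p => p.1.2)).map (fun p => (p.1.1, p.1.2, p.2))

-- ===== PRECONDITION & SPEC =====
def Spec_group_to_map (v : List (List Int)) (out : List (Int × Int × Int)) : Prop := out = group_to_map_alt v
instance (v : List (List Int)) (out : List (Int × Int × Int)) : Decidable (Spec_group_to_map v out) := by unfold Spec_group_to_map; infer_instance

-- ===== CLAIM (what is proved, stated in full; the proofs are below) =====
def Claim_equal_group_to_map : Prop := ∀ (v : List (List Int)), Dom_group_to_map v → Spec_group_to_map v (group_to_map v)

-- ===== LEMMAS AND PROOFS =====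

-- recursion view of A's run scan: current run is [a, b) (b = last element + 1)
def runs2 (a b : Int) : List Int → List (Int × Int)
  | [] => [(a, b)]
  | x :: xs => if x = b then runs2 a (x + 1) xs else (a, b) :: runs2 x (x + 1) xs

lemma foldl_runStepA (l : List Int) (P : List (Int × Int)) (a b : Int) :
    l.foldl runStepA (P ++ [(a, b)]) = P ++ runs2 a b l := by
  induction l generalizing P a b with
  | nil => simp [runs2]
  | cons x xs ih =>
    simp only [List.foldl_cons, runs2]
    rw [show runStepA (P ++ [(a, b)]) x
        = if x = b then P ++ [(a, x + 1)] else (P ++ [(a, b)]) ++ [(x, x + 1)] by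
      simp [runStepA]]
    split_ifs with h
    · exact ih P a (x + 1)
    · rw [ih (P ++ [(a, b)]) x (x + 1)]
      simp

-- recursion view of B's boundary pairing: current run started at a, prev = element just consumed
def coreRec (a prev : Int) : List Int → List (Int × Int)
  | [] => [(a, prev)]
  | y :: t => if y ≠ prev + 1 then (a, prev) :: coreRec y y t else coreRec a y t

lemma gapsOf_cons_cons (x y : Int) (t : List Int) :
    gapsOf (x :: y :: t) = if y = x + 1 then gapsOf (y :: t) else (x, y) :: gapsOf (y :: t) := by
  by_cases h : y = x + 1 <;> simp [gapsOf, h]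

lemma zip_gaps_eq_coreRec (rest : List Int) (prev a : Int) :
    (a :: (gapsOf (prev :: rest)).map Prod.snd).zip
      ((gapsOf (prev :: rest)).map Prod.fst ++ (prev :: rest).drop ((prev :: rest).length - 1))
    = coreRec a prev rest := by
  induction rest generalizing prev a with
  | nil => simp [gapsOf, coreRec]
  | cons y t ih =>
    have hdrop : (prev :: y :: t).drop ((prev :: y :: t).length - 1)
        = (y :: t).drop ((y :: t).length - 1) := by
      simp [List.length_cons]
    rw [gapsOf_cons_cons, hdrop]
    simp only [coreRec]
    by_cases h : y = prev + 1
    · rw [if_pos h]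
      simp only [ite_not, if_pos h]
      exact ih y a
    · rw [if_neg h]
      simp only [ite_not, if_neg h, List.map_cons, List.cons_append, List.zip_cons_cons]
      rw [ih y y]

lemma runs2_eq_coreRec (rest : List Int) (prev a : Int) :
    runs2 a (prev + 1) rest = (coreRec a prev rest).map (fun ab => (ab.1, ab.2 + 1)) := by
  induction rest generalizing prev a with
  | nil => simp [runs2, coreRec]
  | cons x xs ih =>
    simp only [runs2, coreRec]
    by_cases h : x = prev + 1
    · subst h
      simp only [ite_not]
      norm_num
      exact ih (prev + 1) a
    · simp only [ite_not, if_neg h, List.map_cons]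
      rw [ih x x]

-- per-set agreement: A's scan over sorted(s) produces exactly B's ranges with the +1 applied
lemma runsA_eq_rangesB (s : List Int) (hs : s ≠ []) :
    (match PySem.List.sorted s (fun x => x) with
      | [] => ([] : List (Int × Int))
      | x0 :: rest => rest.foldl runStepA [(x0, x0 + 1)])
    = (rangesB s).map (fun ab => (ab.1, ab.2 + 1)) := by
  unfold rangesB
  have hsv : PySem.List.sorted s (fun x => x) ≠ [] := by
    simpa [PySem.List.sorted_eq_nil_iff] using hs
  obtain ⟨x0, rest, hx⟩ := List.exists_cons_of_ne_nil hsv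
  simp only [hx]
  have h1 : rest.foldl runStepA ([] ++ [(x0, x0 + 1)]) = [] ++ runs2 x0 (x0 + 1) rest :=
    foldl_runStepA rest [] x0 (x0 + 1)
  simp only [List.nil_append] at h1
  rw [h1, runs2_eq_coreRec rest x0 x0]
  congr 1
  rw [← zip_gaps_eq_coreRec rest x0 x0]
  simp [pysem]

lemma rangesB_nil : rangesB [] = [] := by decide

-- the two dicts coincide
lemma dicts_eq (v : List (List Int)) :
    (PySem.List.enumerate v).foldl
      (fun (u : PySem.Dict (Int × Int) Int) ks =>
        if ks.2 = [] then u
        else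
          let sv := PySem.List.sorted ks.2 (fun x => x)
          let su := match sv with
            | [] => ([] : List (Int × Int))
            | x0 :: rest => rest.foldl runStepA [(x0, x0 + 1)]
          su.foldl (fun u ab => u.insert ab ks.1) u)
      PySem.Dict.empty
    = PySem.Dict.ofList
        ((PySem.List.enumerate v).flatMap (fun ks => (rangesB ks.2).map (fun ab => ((ab.1, ab.2 + 1), ks.1)))) := by
  show _ = ((PySem.List.enumerate v).flatMap _).foldl
      (fun (d : PySem.Dict (Int × Int) Int) (p : (Int × Int) × Int) => d.insert p.1 p.2) PySem.Dict.empty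
  rw [List.foldl_flatMap]
  congr 1
  funext u ks
  by_cases hs : ks.2 = []
  · simp [hs, rangesB_nil]
  · simp only [if_neg hs, runsA_eq_rangesB ks.2 hs, List.foldl_map]

-- ===== VERDICT (by name: the statement is the Claim_ definition above) =====
theorem group_to_map_spec : Claim_equal_group_to_map := by
  intro v _
  show group_to_map v = group_to_map_alt v
  unfold group_to_map group_to_map_alt
  by_cases hv : v = []
  · subst hv; decide
  · rw [if_neg hv, dicts_eq v]
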